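-- pv_equiv track=rewrite | github.com/RisingSunLight42/AdventOfCode | 2017/december03/script.py | part_one
-- ===== SOURCE A (Python) =====
-- def part_one(target):
-- 	grid = {}
-- 	pos = [0, 0]
-- 	number = 1
-- 	grid[(0,0)] = number
-- 	# right 1, up 1, left 2, down 2, right 3, up 3...
-- 	counter = 1
-- 	# 1: right, 2: up, 3: left, 4: down, 5: right...
-- 	direction = 1
-- 	while True:
-- 		for times in range(counter):
-- 			number += 1
-- 			if direction % 4 == 1: pos[1] += 1
-- 			elif direction % 4 == 2: pos[0] -= 1
-- 			elif direction % 4 == 3: pos[1] -= 1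
-- 			elif direction % 4 == 0: pos[0] += 1
--
-- 			grid[(pos[0], pos[1])] = number
-- 			if number == target:
-- 				return abs(pos[0]) + abs(pos[1])
--
-- 		if direction % 2 == 0: counter += 1
-- 		direction += 1
-- ===== SOURCE B (Python) =====
-- import math
--
-- def part_one(target):
-- 	# Closed form: ring k = ceil((isqrt(target-1))/2 ...), distance = k + |offset-on-side - (k-1)|
-- 	if target == 1:
-- 		return 0
-- 	k = (math.isqrt(target - 1) + 1) // 2
-- 	off = target - (2 * k - 1) ** 2 - 1
-- 	r = off % (2 * k)
-- 	return k + abs(r - (k - 1))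
-- ===== Notes on version B (the rewrite author's own statement) =====
-- stated objective: faster
-- what changed: A walks the spiral cell by cell in a dict until it reaches target; B computes the answer in closed form: the ring index from an integer square root and the distance as ring + offset from the side midpoint.
import Mathlib
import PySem

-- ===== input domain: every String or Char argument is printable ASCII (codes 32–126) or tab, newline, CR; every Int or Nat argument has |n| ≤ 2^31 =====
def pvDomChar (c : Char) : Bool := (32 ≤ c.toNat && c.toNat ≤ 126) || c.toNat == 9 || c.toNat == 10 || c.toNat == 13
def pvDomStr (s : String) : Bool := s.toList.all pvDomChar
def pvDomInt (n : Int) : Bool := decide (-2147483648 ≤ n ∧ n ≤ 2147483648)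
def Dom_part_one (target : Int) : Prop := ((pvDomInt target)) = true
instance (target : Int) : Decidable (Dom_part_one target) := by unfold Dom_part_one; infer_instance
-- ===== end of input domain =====

-- B replaces A's step-by-step walk of the whole spiral (O(target)) by the O(1) closed form:
-- ring index from an integer square root, distance = ring + offset from the side midpoint.
-- A's `while True` loop is ported with explicit fuel (2*target+4 steps always suffice on Pre_);
-- A returns only for target ≥ 2 (it loops forever otherwise), which is exactly Pre_part_one.

-- ===== PORT A =====
def pvStepA (direction x y : Int) : Int × Int :=
  if PySem.Int.mod direction 4 = 1 then (x, y + 1)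
  else if PySem.Int.mod direction 4 = 2 then (x - 1, y)
  else if PySem.Int.mod direction 4 = 3 then (x, y - 1)
  else if PySem.Int.mod direction 4 = 0 then (x + 1, y)
  else (x, y)

def pvLoopA (fuel : Nat) (target x y number counter direction : Int) (timesLeft : Nat) : Option Int :=
  match fuel with
  | 0 => none
  | f + 1 =>
    match timesLeft with
    | 0 =>
      -- end of the `for times in range(counter)` loop: update counter/direction, start next for-loop
      let counter' := if PySem.Int.mod direction 2 = 0 then counter + 1 else counter
      pvLoopA f target x y number counter' (direction + 1) counter'.toNat
    | t + 1 =>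
      let p := pvStepA direction x y
      if number + 1 = target then some (|p.1| + |p.2|)
      else pvLoopA f target p.1 p.2 (number + 1) counter direction t

def part_one (target : Int) : Int :=
  (pvLoopA (2 * target.toNat + 4) target 0 0 1 1 1 1).getD 0

-- ===== PORT B =====
def part_one_alt (target : Int) : Int :=
  if target = 1 then 0
  else
    let k : Int := PySem.Int.floordiv ((Nat.sqrt (target - 1).toNat : Int) + 1) 2
    let off : Int := target - (2 * k - 1) ^ 2 - 1
    let r : Int := PySem.Int.mod off (2 * k)
    k + |r - (k - 1)|

-- ===== PRECONDITION & SPEC =====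
-- A returns only for target ≥ 2: for any target ≤ 1 its `while True` never hits `number == target`
-- (number starts at 1 and only grows), so A loops forever there; Pre_ excludes exactly those inputs.
def Pre_part_one (target : Int) : Prop := 2 ≤ target
instance (target : Int) : Decidable (Pre_part_one target) := by unfold Pre_part_one; infer_instance
def pvWitness_part_one : Int := (25)

def Spec_part_one (target : Int) (out : Int) : Prop := out = part_one_alt target
instance (target : Int) (out : Int) : Decidable (Spec_part_one target out) := by unfold Spec_part_one; infer_instance

-- ===== CLAIM (what is proved, stated in full; the proofs are below) =====
def Claim_equal_part_one : Prop := ∀ (target : Int), Dom_part_one target → Pre_part_one target → Spec_part_one target (part_one target)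

-- ===== LEMMAS AND PROOFS =====

-- Segment decomposition of A's walk: segment j (j ≥ 1) moves in direction j for segL j steps,
-- starting at position segP j having just placed number segN j.  Writing j = 4*m+1+c, c < 4:
def pvSegL (j : Nat) : Int := (((j + 1) / 2 : Nat) : Int)
def pvSegN (j : Nat) : Int :=
  let m : Int := (((j - 1) / 4 : Nat) : Int)
  match (j - 1) % 4 with
  | 0 => 4*m*m + 2*m + 1
  | 1 => 4*m*m + 4*m + 2
  | 2 => 4*m*m + 6*m + 3
  | _ => 4*m*m + 8*m + 5
def pvSegP (j : Nat) : Int × Int :=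
  let m : Int := (((j - 1) / 4 : Nat) : Int)
  match (j - 1) % 4 with
  | 0 => (m, -m)
  | 1 => (m, m + 1)
  | 2 => (-(m+1), m+1)
  | _ => (-(m+1), -(m+1))

lemma pv_run_hit : ∀ (t : Nat) (fuel : Nat) (target x y number counter direction dx dy : Int),
    (∀ a b : Int, pvStepA direction a b = (a + dx, b + dy)) →
    number < target → target ≤ number + (t : Int) → (target - number).toNat ≤ fuel →
    pvLoopA fuel target x y number counter direction t
      = some (|x + dx * (target - number)| + |y + dy * (target - number)|) := by
  intro t
  induction t with
  | zero =>
    intro fuel target x y number counter direction dx dy hd h1 h2 hf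
    exfalso; simp at h2; omega
  | succ t ih =>
    intro fuel target x y number counter direction dx dy hd h1 h2 hf
    cases fuel with
    | zero => exfalso; omega
    | succ f =>
      simp only [pvLoopA, hd]
      by_cases he : number + 1 = target
      · rw [if_pos he]
        have h3 : target - number = 1 := by omega
        rw [h3]; norm_num
      · rw [if_neg he]
        rw [ih f target (x + dx) (y + dy) (number + 1) counter direction dx dy hd
            (by omega) (by push_cast at h2 ⊢; omega) (by omega)]
        have e1 : x + dx + dx * (target - (number + 1)) = x + dx * (target - number) := by ring
        have e2 : y + dy + dy * (target - (number + 1)) = y + dy * (target - number) := by ring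
        rw [e1, e2]

lemma pv_run_pass : ∀ (t : Nat) (fuel : Nat) (target x y number counter direction dx dy : Int),
    (∀ a b : Int, pvStepA direction a b = (a + dx, b + dy)) →
    number + (t : Int) < target →
    pvLoopA (fuel + (t+1)) target x y number counter direction t
      = pvLoopA fuel target (x + dx * t) (y + dy * t) (number + t)
          (if PySem.Int.mod direction 2 = 0 then counter + 1 else counter) (direction + 1)
          (if PySem.Int.mod direction 2 = 0 then counter + 1 else counter).toNat := by
  intro t
  induction t with
  | zero =>
    intro fuel target x y number counter direction dx dy hd hlt
    simp only [pvLoopA]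
    norm_num
  | succ t ih =>
    intro fuel target x y number counter direction dx dy hd hlt
    have hfe : fuel + (t + 1 + 1) = (fuel + (t + 1)) + 1 := by omega
    rw [hfe]
    rw [pvLoopA]
    simp only [hd]
    rw [if_neg (by push_cast at hlt; omega)]
    rw [ih fuel target (x + dx) (y + dy) (number + 1) counter direction dx dy hd
        (by push_cast at hlt ⊢; omega)]
    have e1 : x + dx + dx * (t : Int) = x + dx * ((t : Nat) + 1 : Nat) := by push_cast; ring
    have e2 : y + dy + dy * (t : Int) = y + dy * ((t : Nat) + 1 : Nat) := by push_cast; ring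
    have e3 : number + 1 + (t : Int) = number + ((t : Nat) + 1 : Nat) := by push_cast; ring
    rw [e1, e2, e3]

def pvDx : Nat → Int | 0 => 0 | 1 => -1 | 2 => 0 | _ => 1
def pvDy : Nat → Int | 0 => 1 | 1 => 0 | 2 => -1 | _ => 0

lemma pv_mod2_cast (j : Nat) : PySem.Int.mod (j : Int) 2 = ((j % 2 : Nat) : Int) := by
  exact_mod_cast PySem.Int.mod_natCast j 2

lemma pv_segL_val (j : Nat) : pvSegL j = (((j + 1) / 2 : Nat) : Int) := rfl

lemma pv_hd_j (j : Nat) (hj : 1 ≤ j) :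
    ∀ a b : Int, pvStepA (j : Int) a b = (a + pvDx ((j - 1) % 4), b + pvDy ((j - 1) % 4)) := by
  intro a b
  have hc : (j - 1) % 4 = 0 ∧ j % 4 = 1 ∨ (j - 1) % 4 = 1 ∧ j % 4 = 2 ∨
      (j - 1) % 4 = 2 ∧ j % 4 = 3 ∨ (j - 1) % 4 = 3 ∧ j % 4 = 0 := by omega
  rcases hc with ⟨h1, h2⟩ | ⟨h1, h2⟩ | ⟨h1, h2⟩ | ⟨h1, h2⟩ <;> rw [h1]
  · have h5 : (j : Int) % 4 = 1 := by omega
    simp [pvStepA, h5, pvDx, pvDy]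
  · have h5 : (j : Int) % 4 = 2 := by omega
    simp [pvStepA, h5, pvDx, pvDy, sub_eq_add_neg]
  · have h5 : (j : Int) % 4 = 3 := by omega
    simp [pvStepA, h5, pvDx, pvDy, sub_eq_add_neg]
  · have h5 : (j : Int) % 4 = 0 := by omega
    simp [pvStepA, h5, pvDx, pvDy]

lemma pv_segL_step (j : Nat) (_hj : 1 ≤ j) :
    (if PySem.Int.mod (j : Int) 2 = 0 then pvSegL j + 1 else pvSegL j) = pvSegL (j + 1) := by
  rw [pv_mod2_cast, pv_segL_val, pv_segL_val]
  by_cases h : j % 2 = 0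
  · rw [h]; norm_num; omega
  · rw [show j % 2 = 1 from by omega]; norm_num; omega

lemma pv_segN_step (j : Nat) (hj : 1 ≤ j) : pvSegN j + pvSegL j = pvSegN (j + 1) := by
  have hc : (j - 1) % 4 = 0 ∨ (j - 1) % 4 = 1 ∨ (j - 1) % 4 = 2 ∨ (j - 1) % 4 = 3 := by omega
  simp only [pvSegN, pvSegL]
  rcases hc with h1 | h1 | h1 | h1
  · rw [h1, show (j + 1 - 1) % 4 = 1 from by omega, show (j + 1 - 1) / 4 = (j - 1) / 4 from by omega,
        show (j + 1) / 2 = 2 * ((j - 1) / 4) + 1 from by omega]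
    norm_num; ring
  · rw [h1, show (j + 1 - 1) % 4 = 2 from by omega, show (j + 1 - 1) / 4 = (j - 1) / 4 from by omega,
        show (j + 1) / 2 = 2 * ((j - 1) / 4) + 1 from by omega]
    norm_num; ring
  · rw [h1, show (j + 1 - 1) % 4 = 3 from by omega, show (j + 1 - 1) / 4 = (j - 1) / 4 from by omega,
        show (j + 1) / 2 = 2 * ((j - 1) / 4) + 2 from by omega]
    norm_num; ring
  · rw [h1, show (j + 1 - 1) % 4 = 0 from by omega, show (j + 1 - 1) / 4 = (j - 1) / 4 + 1 from by omega,
        show (j + 1) / 2 = 2 * ((j - 1) / 4) + 2 from by omega]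
    norm_num; ring

lemma pv_segP_step (j : Nat) (hj : 1 ≤ j) :
    (pvSegP (j + 1)).1 = (pvSegP j).1 + pvDx ((j - 1) % 4) * pvSegL j ∧
    (pvSegP (j + 1)).2 = (pvSegP j).2 + pvDy ((j - 1) % 4) * pvSegL j := by
  have hc : (j - 1) % 4 = 0 ∨ (j - 1) % 4 = 1 ∨ (j - 1) % 4 = 2 ∨ (j - 1) % 4 = 3 := by omega
  simp only [pvSegP, pvSegL]
  rcases hc with h1 | h1 | h1 | h1
  · rw [h1, show (j + 1 - 1) % 4 = 1 from by omega, show (j + 1 - 1) / 4 = (j - 1) / 4 from by omega,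
        show (j + 1) / 2 = 2 * ((j - 1) / 4) + 1 from by omega]
    norm_num [pvDx, pvDy]; ring
  · rw [h1, show (j + 1 - 1) % 4 = 2 from by omega, show (j + 1 - 1) / 4 = (j - 1) / 4 from by omega,
        show (j + 1) / 2 = 2 * ((j - 1) / 4) + 1 from by omega]
    norm_num [pvDx, pvDy]; ring
  · rw [h1, show (j + 1 - 1) % 4 = 3 from by omega, show (j + 1 - 1) / 4 = (j - 1) / 4 from by omega,
        show (j + 1) / 2 = 2 * ((j - 1) / 4) + 2 from by omega]
    norm_num [pvDx, pvDy]; ring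
  · rw [h1, show (j + 1 - 1) % 4 = 0 from by omega, show (j + 1 - 1) / 4 = (j - 1) / 4 + 1 from by omega,
        show (j + 1) / 2 = 2 * ((j - 1) / 4) + 2 from by omega]
    norm_num [pvDx, pvDy]; ring

lemma pv_alt_formula (target : Int) (a k : Nat) (q r : Int) (hk0 : 1 ≤ k)
    (h2t : 2 ≤ target)
    (ha1 : ((a * a : Nat) : Int) ≤ target - 1)
    (ha2 : target - 1 < (((a + 1) * (a + 1) : Nat) : Int))
    (hk : (a + 1) / 2 = k)
    (hoff : target - (2 * (k : Int) - 1) ^ 2 - 1 = r + 2 * (k : Int) * q)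
    (hr0 : 0 ≤ r) (hr1 : r < 2 * (k : Int)) :
    part_one_alt target = (k : Int) + |r - ((k : Int) - 1)| := by
  have hsq : Nat.sqrt (target - 1).toNat = a := by
    have hb1 : a ≤ Nat.sqrt (target - 1).toNat := Nat.le_sqrt.mpr (by omega)
    have hb2 : Nat.sqrt (target - 1).toNat < a + 1 := Nat.sqrt_lt.mpr (by omega)
    omega
  have hkk : PySem.Int.floordiv ((a : Int) + 1) 2 = (k : Int) := by
    have h := PySem.Int.floordiv_natCast (a + 1) 2
    rw [hk] at h
    exact_mod_cast h
  conv_lhs => simp only [part_one_alt]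
  rw [if_neg (by omega), hsq, hkk,
    PySem.Int.mod_eq_emod_of_pos (by omega), hoff, Int.add_mul_emod_self_left,
    Int.emod_eq_of_lt hr0 hr1]

lemma pv_endgame (j : Nat) (hj : 1 ≤ j) (target s : Int) (hs1 : 1 ≤ s) (hs2 : s ≤ pvSegL j)
    (heq : target = pvSegN j + s) :
    some (|(pvSegP j).1 + pvDx ((j - 1) % 4) * s| + |(pvSegP j).2 + pvDy ((j - 1) % 4) * s|)
      = some (part_one_alt target) := by
  obtain ⟨s', rfl⟩ : ∃ s' : Nat, s = (s' : Int) := ⟨s.toNat, by omega⟩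
  obtain ⟨q, hq⟩ : ∃ q : Nat, ((j - 1) / 4) * ((j - 1) / 4) = q := ⟨_, rfl⟩
  have hc : (j - 1) % 4 = 0 ∨ (j - 1) % 4 = 1 ∨ (j - 1) % 4 = 2 ∨ (j - 1) % 4 = 3 := by omega
  rw [pv_segL_val] at hs2
  simp only [pvSegN, pvSegP] at heq ⊢
  rcases hc with h1 | h1 | h1 | h1 <;> rw [h1] at heq ⊢ <;>
      simp only [pvDx, pvDy] <;> norm_num at heq ⊢
  -- c = 0 : up segment from (m, -m), numbers 4q+2m+1+s', s' ∈ [1, 2m+1]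
  · rw [show (j + 1) / 2 = 2 * ((j - 1) / 4) + 1 from by omega] at hs2
    have htarget : target = ((4 * q + 2 * ((j - 1) / 4) + 1 + s' : Nat) : Int) := by
      rw [heq]; push_cast [← hq]; ring
    have hs2' : s' ≤ 2 * ((j - 1) / 4) + 1 := by exact_mod_cast hs2
    by_cases hcase : s' ≤ 2 * ((j - 1) / 4)
    · -- inner part of the ring: isqrt = 2m, k = m
      have hm1 : 1 ≤ (j - 1) / 4 := by omega
      rw [pv_alt_formula target (2 * ((j - 1) / 4)) ((j - 1) / 4) 3 ((s' : Int) - 1) hm1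
        (by rw [htarget]; push_cast; omega)
        (by
            have e0 : (2 * ((j - 1) / 4)) * (2 * ((j - 1) / 4)) = 4 * q := by rw [← hq]; ring
            rw [e0, htarget]; push_cast; omega)
        (by
            have : ((2 * ((j - 1) / 4) + 1) * (2 * ((j - 1) / 4) + 1)) = 4 * q + 4 * ((j - 1) / 4) + 1 := by
              rw [← hq]; ring
            rw [htarget, this]; push_cast; omega)
        (by omega)
        (by rw [htarget]; push_cast [← hq]; ring)
        (by omega) (by push_cast; omega)]
      rcases le_total ((s' : Int)) (((j - 1) / 4 : Nat) : Int) with h | h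
      · rw [abs_of_nonneg (by positivity), abs_of_nonpos (by omega),
          abs_of_nonpos (by push_cast; omega)]
        push_cast; ring
      · rw [abs_of_nonneg (by positivity), abs_of_nonneg (by omega),
          abs_of_nonneg (by push_cast; omega)]
        push_cast; ring
    · -- corner step s' = 2m+1 : first cell of the next ring
      have hs'' : s' = 2 * ((j - 1) / 4) + 1 := by omega
      rw [hs''] at htarget
      have e1 : (2 * ((j - 1) / 4) + 1) * (2 * ((j - 1) / 4) + 1)
          = 4 * q + 4 * ((j - 1) / 4) + 1 := by rw [← hq]; ring
      have e2 : (2 * ((j - 1) / 4) + 1 + 1) * (2 * ((j - 1) / 4) + 1 + 1)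
          = 4 * q + 8 * ((j - 1) / 4) + 4 := by rw [← hq]; ring
      rw [pv_alt_formula target (2 * ((j - 1) / 4) + 1) ((j - 1) / 4 + 1) 0 0 (by omega)
        (by rw [htarget]; push_cast; omega)
        (by rw [e1, htarget]; push_cast; omega)
        (by rw [e2, htarget]; push_cast; omega)
        (by omega)
        (by rw [htarget]; push_cast [← hq]; ring)
        (by omega) (by push_cast; omega)]
      rw [abs_of_nonneg (by omega : (0:Int) ≤ ((j - 1 : Nat) : Int) / 4),
        abs_of_nonneg (by omega : (0:Int) ≤ -(((j - 1 : Nat) : Int) / 4) + (s' : Int)),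
        abs_of_nonpos (by push_cast; omega)]
      push_cast; omega
  -- c = 1 : left segment from (m, m+1)
  · rw [show (j + 1) / 2 = 2 * ((j - 1) / 4) + 1 from by omega] at hs2
    have hs2' : s' ≤ 2 * ((j - 1) / 4) + 1 := by exact_mod_cast hs2
    have htarget : target = ((4 * q + 4 * ((j - 1) / 4) + 2 + s' : Nat) : Int) := by
      rw [heq]; push_cast [← hq]; ring
    have e1 : (2 * ((j - 1) / 4) + 1) * (2 * ((j - 1) / 4) + 1)
        = 4 * q + 4 * ((j - 1) / 4) + 1 := by rw [← hq]; ring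
    have e2 : (2 * ((j - 1) / 4) + 1 + 1) * (2 * ((j - 1) / 4) + 1 + 1)
        = 4 * q + 8 * ((j - 1) / 4) + 4 := by rw [← hq]; ring
    rw [pv_alt_formula target (2 * ((j - 1) / 4) + 1) ((j - 1) / 4 + 1) 0 ((s' : Int)) (by omega)
      (by rw [htarget]; push_cast; omega)
      (by rw [e1, htarget]; push_cast; omega)
      (by rw [e2, htarget]; push_cast; omega)
      (by omega)
      (by rw [htarget]; push_cast [← hq]; ring)
      (by omega) (by push_cast; omega)]
    rcases le_total ((s' : Int)) (((j - 1 : Nat) : Int) / 4) with h | h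
    · rw [abs_of_nonneg (by omega : (0:Int) ≤ (((j - 1 : Nat) : Int) / 4) + -(s' : Int)),
        abs_of_nonneg (by omega : (0:Int) ≤ (((j - 1 : Nat) : Int) / 4) + 1),
        abs_of_nonpos (by push_cast; omega)]
      push_cast; omega
    · rw [abs_of_nonpos (by omega : (((j - 1 : Nat) : Int) / 4) + -(s' : Int) ≤ 0),
        abs_of_nonneg (by omega : (0:Int) ≤ (((j - 1 : Nat) : Int) / 4) + 1),
        abs_of_nonneg (by push_cast; omega)]
      push_cast; omega
  -- c = 2 : down segment from (-(m+1), m+1)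
  · rw [show (j + 1) / 2 = 2 * ((j - 1) / 4) + 2 from by omega] at hs2
    have hs2' : s' ≤ 2 * ((j - 1) / 4) + 2 := by exact_mod_cast hs2
    have htarget : target = ((4 * q + 6 * ((j - 1) / 4) + 3 + s' : Nat) : Int) := by
      rw [heq]; push_cast [← hq]; ring
    have e1 : (2 * ((j - 1) / 4) + 1) * (2 * ((j - 1) / 4) + 1)
        = 4 * q + 4 * ((j - 1) / 4) + 1 := by rw [← hq]; ring
    have e2 : (2 * ((j - 1) / 4) + 1 + 1) * (2 * ((j - 1) / 4) + 1 + 1)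
        = 4 * q + 8 * ((j - 1) / 4) + 4 := by rw [← hq]; ring
    have e3 : (2 * ((j - 1) / 4) + 2) * (2 * ((j - 1) / 4) + 2)
        = 4 * q + 8 * ((j - 1) / 4) + 4 := by rw [← hq]; ring
    have e4 : (2 * ((j - 1) / 4) + 2 + 1) * (2 * ((j - 1) / 4) + 2 + 1)
        = 4 * q + 12 * ((j - 1) / 4) + 9 := by rw [← hq]; ring
    have hrest : part_one_alt target
        = (((j - 1) / 4 + 1 : Nat) : Int) + |((s' : Int) - 1) - ((((j - 1) / 4 + 1 : Nat) : Int) - 1)| := by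
      by_cases hcase : s' ≤ 2 * ((j - 1) / 4) + 1
      · exact pv_alt_formula target (2 * ((j - 1) / 4) + 1) ((j - 1) / 4 + 1) 1 ((s' : Int) - 1) (by omega)
          (by rw [htarget]; push_cast; omega)
          (by rw [e1, htarget]; push_cast; omega)
          (by rw [e2, htarget]; push_cast; omega)
          (by omega)
          (by rw [htarget]; push_cast [← hq]; ring)
          (by omega) (by push_cast; omega)
      · exact pv_alt_formula target (2 * ((j - 1) / 4) + 2) ((j - 1) / 4 + 1) 1 ((s' : Int) - 1) (by omega)
          (by rw [htarget]; push_cast; omega)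
          (by rw [e3, htarget]; push_cast; omega)
          (by rw [e4, htarget]; push_cast; omega)
          (by omega)
          (by rw [htarget]; push_cast [← hq]; ring)
          (by omega) (by push_cast; omega)
    rw [hrest]
    rcases le_total ((s' : Int)) (((j - 1 : Nat) : Int) / 4 + 1) with h | h
    · rw [abs_of_nonpos (by omega : (-1 : Int) + -(((j - 1 : Nat) : Int) / 4) ≤ 0),
        abs_of_nonneg (by omega : (0:Int) ≤ (((j - 1 : Nat) : Int) / 4) + 1 + -(s' : Int)),
        abs_of_nonpos (by push_cast; omega)]
      push_cast; omega
    · rw [abs_of_nonpos (by omega : (-1 : Int) + -(((j - 1 : Nat) : Int) / 4) ≤ 0),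
        abs_of_nonpos (by omega : (((j - 1 : Nat) : Int) / 4) + 1 + -(s' : Int) ≤ 0),
        abs_of_nonneg (by push_cast; omega)]
      push_cast; omega
  -- c = 3 : right segment from (-(m+1), -(m+1))
  · rw [show (j + 1) / 2 = 2 * ((j - 1) / 4) + 2 from by omega] at hs2
    have hs2' : s' ≤ 2 * ((j - 1) / 4) + 2 := by exact_mod_cast hs2
    have htarget : target = ((4 * q + 8 * ((j - 1) / 4) + 5 + s' : Nat) : Int) := by
      rw [heq]; push_cast [← hq]; ring
    have e3 : (2 * ((j - 1) / 4) + 2) * (2 * ((j - 1) / 4) + 2)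
        = 4 * q + 8 * ((j - 1) / 4) + 4 := by rw [← hq]; ring
    have e4 : (2 * ((j - 1) / 4) + 2 + 1) * (2 * ((j - 1) / 4) + 2 + 1)
        = 4 * q + 12 * ((j - 1) / 4) + 9 := by rw [← hq]; ring
    rw [pv_alt_formula target (2 * ((j - 1) / 4) + 2) ((j - 1) / 4 + 1) 2 ((s' : Int) - 1) (by omega)
      (by rw [htarget]; push_cast; omega)
      (by rw [e3, htarget]; push_cast; omega)
      (by rw [e4, htarget]; push_cast; omega)
      (by omega)
      (by rw [htarget]; push_cast [← hq]; ring)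
      (by omega) (by push_cast; omega)]
    rcases le_total ((s' : Int)) (((j - 1 : Nat) : Int) / 4 + 1) with h | h
    · rw [abs_of_nonpos (by omega : (-1 : Int) + -(((j - 1 : Nat) : Int) / 4) + (s' : Int) ≤ 0),
        abs_of_nonpos (by omega : (-1 : Int) + -(((j - 1 : Nat) : Int) / 4) ≤ 0),
        abs_of_nonpos (by push_cast; omega)]
      push_cast; omega
    · rw [abs_of_nonneg (by omega : (0:Int) ≤ (-1 : Int) + -(((j - 1 : Nat) : Int) / 4) + (s' : Int)),
        abs_of_nonpos (by omega : (-1 : Int) + -(((j - 1 : Nat) : Int) / 4) ≤ 0),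
        abs_of_nonneg (by push_cast; omega)]
      push_cast; omega

lemma pv_main : ∀ (n : Nat), ∀ (j : Nat) (target : Int) (f : Nat), 1 ≤ j →
    pvSegN j < target → target = pvSegN j + (n : Int) →
    pvLoopA (f + 2 * n) target (pvSegP j).1 (pvSegP j).2 (pvSegN j) (pvSegL j) (j : Int)
        (pvSegL j).toNat
      = some (part_one_alt target) := by
  intro n
  induction n using Nat.strong_induction_on with
  | _ n ih =>
    intro j target f hj hlt heq
    have hL := pv_segL_val j
    have hL1 : 1 ≤ (j + 1) / 2 := by omega
    by_cases hcase : target ≤ pvSegN j + (((j + 1) / 2 : Nat) : Int)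
    · -- target lies inside the current segment: run to it and stop
      rw [hL, Int.toNat_natCast]
      rw [pv_run_hit ((j + 1) / 2) (f + 2 * n) target (pvSegP j).1 (pvSegP j).2 (pvSegN j)
        (((j + 1) / 2 : Nat) : Int) ((j : Int)) (pvDx ((j - 1) % 4)) (pvDy ((j - 1) % 4))
        (pv_hd_j j hj) hlt hcase (by omega)]
      exact pv_endgame j hj target (target - pvSegN j) (by omega) (by rw [hL]; omega)
        (by ring)
    · -- the whole segment is passed: step to segment j+1 and use the induction hypothesis
      push Not at hcase
      have hn : (j + 1) / 2 + 1 ≤ n := by omega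
      rw [hL, Int.toNat_natCast,
        show f + 2 * n = (f + ((j + 1) / 2 - 1) + 2 * (n - (j + 1) / 2)) + ((j + 1) / 2 + 1)
          from by omega]
      rw [pv_run_pass ((j + 1) / 2) (f + ((j + 1) / 2 - 1) + 2 * (n - (j + 1) / 2)) target
        (pvSegP j).1 (pvSegP j).2 (pvSegN j) (((j + 1) / 2 : Nat) : Int) ((j : Int))
        (pvDx ((j - 1) % 4)) (pvDy ((j - 1) % 4)) (pv_hd_j j hj) (by omega)]
      have hN1 := pv_segN_step j hj
      have hP1 := pv_segP_step j hj
      have hL2 := pv_segL_step j hj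
      rw [hL] at hN1 hP1 hL2
      rw [hL2, ← hP1.1, ← hP1.2, hN1,
        show ((j : Int) + 1) = ((j + 1 : Nat) : Int) from by push_cast; ring]
      exact ih (n - (j + 1) / 2) (by omega) (j + 1) target (f + ((j + 1) / 2 - 1)) (by omega)
        (by rw [← hN1]; omega) (by rw [← hN1]; push_cast; omega)

-- ===== VERDICT (by name: the statement is the Claim_ definition above) =====
theorem part_one_spec : Claim_equal_part_one := by
  intro target _ hpre
  unfold Pre_part_one at hpre
  unfold Spec_part_one part_one
  have h1 : pvSegN 1 = 1 := by norm_num [pvSegN]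
  have hP : pvSegP 1 = (0, 0) := by norm_num [pvSegP]
  have hL : pvSegL 1 = 1 := by norm_num [pvSegL]
  have hmain := pv_main (target - 1).toNat 1 target
    (2 * target.toNat + 4 - 2 * (target - 1).toNat) (by norm_num)
    (by rw [h1]; omega) (by rw [h1]; omega)
  rw [h1, hP, hL,
    show 2 * target.toNat + 4 - 2 * (target - 1).toNat + 2 * (target - 1).toNat
        = 2 * target.toNat + 4 from by omega] at hmain
  norm_num at hmain
  rw [hmain]
  rfl
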